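-- pv_equiv track=rewrite | github.com/elqabasy/algorithms | rdn.py | right_dominant
-- ===== SOURCE A (Python) =====
-- def right_dominant(L):
--     D=[]
--     max_so_far=float('-inf')
--
--     for i in range(len(L)-1, -1, -1):
--         if(L[i]>max_so_far):
--             D.append(L[i])
--             max_so_far = L[i]
--
--     return D[::-1]
-- ===== SOURCE B (Python) =====
-- def right_dominant(L):
--     # Precompute, for each position, the maximum of everything to its right,
--     # then select in natural left-to-right order.
--     suf = []
--     m = float('-inf')
--     for x in reversed(L):
--         suf.append(m)
--         m = max(m, x)
--     suf.reverse()
--     return [x for x, s in zip(L, suf) if x > s]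
-- ===== Notes on version B (the rewrite author's own statement) =====
-- stated objective: alternative
-- what changed: B precomputes a full suffix-maximum table in one backward pass and then selects elements in a forward left-to-right pass, instead of A's backward select-and-append followed by reversing the selected list.
import Mathlib
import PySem

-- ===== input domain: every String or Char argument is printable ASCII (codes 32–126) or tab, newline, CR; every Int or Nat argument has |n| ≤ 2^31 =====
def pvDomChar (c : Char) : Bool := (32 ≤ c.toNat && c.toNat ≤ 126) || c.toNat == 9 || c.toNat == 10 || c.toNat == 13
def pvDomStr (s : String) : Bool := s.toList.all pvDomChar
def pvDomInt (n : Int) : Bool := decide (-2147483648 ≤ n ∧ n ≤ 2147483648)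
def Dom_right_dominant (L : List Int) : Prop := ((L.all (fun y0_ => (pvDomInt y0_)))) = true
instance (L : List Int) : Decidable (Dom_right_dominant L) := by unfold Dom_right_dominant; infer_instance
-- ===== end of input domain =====

-- B precomputes a suffix-maximum table in one backward pass and then selects
-- left-to-right, instead of A's backward select-and-append plus final reverse.


-- ===== PORT A =====
-- float('-inf') is used only as the initial value of max_so_far; since all
-- compared values are ints, it is modelled exactly by `none` (less than every Int).
def pvGtO (x : Int) (m : Option Int) : Bool :=
  match m with
  | none => true
  | some v => decide (v < x)

def right_dominant (L : List Int) : List Int :=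
  (PySem.List.slice?
    ((PySem.List.pyRange ((L.length : Int) - 1) (-1) (-1)).foldl
      (fun (st : List Int × Option Int) i =>
        if pvGtO (PySem.List.pyGetD L i 0) st.2
        then (st.1 ++ [PySem.List.pyGetD L i 0], some (PySem.List.pyGetD L i 0)) else st)
      ([], none)).1
    none none (-1)).getD []

-- ===== PORT B =====
-- max(m, x) with m possibly -inf
def pvMaxO (m : Option Int) (x : Int) : Option Int :=
  match m with
  | none => some x
  | some v => some (max v x)

-- [x for x, s in zip(L, suf) if x > s]
def pvZipSel : List Int → List (Option Int) → List Int
  | x :: xs, s :: ss => if pvGtO x s then x :: pvZipSel xs ss else pvZipSel xs ss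
  | _, _ => []

def right_dominant_alt (L : List Int) : List Int :=
  pvZipSel L
    ((L.reverse.foldl
      (fun (st : List (Option Int) × Option Int) x => (st.1 ++ [st.2], pvMaxO st.2 x))
      ([], none)).1.reverse)

-- ===== PRECONDITION & SPEC =====
def Spec_right_dominant (L : List Int) (out : List Int) : Prop := out = right_dominant_alt L
instance (L : List Int) (out : List Int) : Decidable (Spec_right_dominant L out) := by unfold Spec_right_dominant; infer_instance

-- ===== CLAIM (what is proved, stated in full; the proofs are below) =====
def Claim_equal_right_dominant : Prop := ∀ (L : List Int), Dom_right_dominant L → Spec_right_dominant L (right_dominant L)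

-- ===== LEMMAS AND PROOFS =====

-- A's step and B's step as foldr functions (right-to-left processing)
def pvStepA (x : Int) (st : List Int × Option Int) : List Int × Option Int :=
  if pvGtO x st.2 then (st.1 ++ [x], some x) else st

def pvStepB (x : Int) (st : List (Option Int) × Option Int) : List (Option Int) × Option Int :=
  (st.1 ++ [st.2], pvMaxO st.2 x)

lemma pv_key (L : List Int) :
    (L.foldr pvStepA ([], none)).2 = (L.foldr pvStepB ([], none)).2 ∧
    (L.foldr pvStepA ([], none)).1.reverse =
      pvZipSel L (L.foldr pvStepB ([], none)).1.reverse := by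
  induction L with
  | nil => simp [pvZipSel]
  | cons x xs ih =>
    obtain ⟨hm, hd⟩ := ih
    constructor
    · simp only [List.foldr_cons, pvStepA, pvStepB]
      cases h : (xs.foldr pvStepB ([], none)).2 with
      | none => simp [pvGtO, pvMaxO, hm, h]
      | some v =>
        by_cases hlt : v < x
        · simp [pvGtO, pvMaxO, hm, h, hlt, max_eq_right (le_of_lt hlt)]
        · simp [pvGtO, pvMaxO, hm, h, hlt, max_eq_left (by omega : x ≤ v)]
    · simp only [List.foldr_cons, pvStepA, pvStepB]
      rw [hm]
      by_cases h : pvGtO x (xs.foldr pvStepB ([], none)).2 = true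
      · simp [h, pvZipSel, hd]
      · simp [h, pvZipSel, hd]

lemma pv_A_as_foldr (L : List Int) :
    right_dominant L = (L.foldr pvStepA ([], none)).1.reverse := by
  unfold right_dominant
  rw [PySem.List.slice?_none_none_neg_one]
  have hr : PySem.List.pyRange ((L.length : Int) - 1) (-1) (-1)
      = (PySem.List.pyRange 0 (L.length : Int) 1).reverse := by
    rw [PySem.List.pyRange_neg_one_eq_reverse]
    norm_num
  rw [hr, List.foldl_reverse]
  have hmap := PySem.List.map_pyGetD_pyRange_zero L (0 : Int)
  calc ((PySem.List.pyRange 0 (L.length : Int) 1).foldr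
          (fun i st => if pvGtO (PySem.List.pyGetD L i 0) st.2
            then (st.1 ++ [PySem.List.pyGetD L i 0], some (PySem.List.pyGetD L i 0)) else st)
          (([] : List Int), (none : Option Int))).1.reverse
      = (((PySem.List.pyRange 0 (L.length : Int) 1).map
            (fun j => PySem.List.pyGetD L j 0)).foldr pvStepA
          (([] : List Int), (none : Option Int))).1.reverse := by
          rw [List.foldr_map]; rfl
    _ = (L.foldr pvStepA ([], none)).1.reverse := by
          simp only [PySem.List.len_eq] at hmap; rw [hmap]

lemma pv_B_as_foldr (L : List Int) :
    right_dominant_alt L = pvZipSel L (L.foldr pvStepB ([], none)).1.reverse := by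
  unfold right_dominant_alt
  rw [List.foldl_reverse]
  rfl

-- ===== VERDICT (by name: the statement is the Claim_ definition above) =====
theorem right_dominant_spec : Claim_equal_right_dominant := by
  intro L _
  unfold Spec_right_dominant
  rw [pv_A_as_foldr, pv_B_as_foldr]
  exact (pv_key L).2
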